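-- pv_equiv track=rewrite | github.com/DivyanshiSrivastava/MonteCarlo-TF | mcts.py | get_node_children
-- ===== SOURCE A (Python) =====
-- def get_node_children(node):
--     """
--     As input, this function receives a k-mer.
--     It adds all possible 2 bp flanks to this k-mer, resulting in 4 ^ 2 = 16
--     new child k-mers. It returns a list of these new child k-mers.
--     Parameters:
--         node (str): A str parent k-mer. For example: 'TAAT'
--     Returns (list): A list of 16 child k-mers.
--     """
--     # node = k-mer
--     potential_flanks = ['AA', 'AC', 'AG', 'AT', 'CA', 'CC', 'CG', 'CT',
--                         'GA', 'GC', 'GG', 'GT', 'TA', 'TC', 'TG', 'TT']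
--     child_list = []  # this is a list of k-mers
--     for flanks in potential_flanks:
--         child_node = flanks[0] + node + flanks[1]
--         child_list.append(child_node)
--     return child_list
-- ===== SOURCE B (Python) =====
-- def get_node_children(node):
--     children = []
--     for left in 'ACGT':
--         for right in 'ACGT':
--             children.append(left + node + right)
--     return children
-- ===== Notes on version B (the rewrite author's own statement) =====
-- stated objective: simpler
-- what changed: Replaces the hardcoded 16-element flank table and the single loop indexing flanks[0]/flanks[1] with two nested loops over the alphabet 'ACGT' that generate the 4x4 flank pairs on the fly in the same lexicographic order.
import Mathlib
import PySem

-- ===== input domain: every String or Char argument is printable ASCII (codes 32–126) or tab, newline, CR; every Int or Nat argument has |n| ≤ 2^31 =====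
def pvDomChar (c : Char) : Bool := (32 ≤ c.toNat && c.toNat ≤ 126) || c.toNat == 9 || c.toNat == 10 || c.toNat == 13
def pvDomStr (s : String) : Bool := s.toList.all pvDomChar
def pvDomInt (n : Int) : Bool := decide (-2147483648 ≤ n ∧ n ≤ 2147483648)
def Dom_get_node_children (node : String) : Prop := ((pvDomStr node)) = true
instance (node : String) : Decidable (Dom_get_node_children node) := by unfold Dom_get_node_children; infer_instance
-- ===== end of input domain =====

-- B builds the 16 flank pairs with two nested loops over 'ACGT' instead of A's hardcoded table; same output.

-- ===== PORT A =====
-- flanks[0]/flanks[1]: every table entry has length 2, so the .getD is only a totality guard.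
def get_node_children (node : String) : List String :=
  let potential_flanks : List String :=
    ["AA", "AC", "AG", "AT", "CA", "CC", "CG", "CT",
     "GA", "GC", "GG", "GT", "TA", "TC", "TG", "TT"]
  potential_flanks.foldl
    (fun child_list flanks =>
      child_list ++
        [String.singleton ((PySem.Str.pyGet? flanks 0).getD ' ') ++ node ++
         String.singleton ((PySem.Str.pyGet? flanks 1).getD ' ')])
    []

-- ===== PORT B =====
def get_node_children_alt (node : String) : List String :=
  "ACGT".toList.foldl
    (fun children left =>
      "ACGT".toList.foldl
        (fun children right =>
          children ++ [String.singleton left ++ node ++ String.singleton right])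
        children)
    []

-- ===== PRECONDITION & SPEC =====
def Spec_get_node_children (node : String) (out : List String) : Prop := out = get_node_children_alt node
instance (node : String) (out : List String) : Decidable (Spec_get_node_children node out) := by unfold Spec_get_node_children; infer_instance

-- ===== CLAIM (what is proved, stated in full; the proofs are below) =====
def Claim_equal_get_node_children : Prop := ∀ (node : String), Dom_get_node_children node → Spec_get_node_children node (get_node_children node)

-- ===== LEMMAS AND PROOFS =====

-- ===== VERDICT (by name: the statement is the Claim_ definition above) =====
theorem get_node_children_spec : Claim_equal_get_node_children := by
  intro node _
  unfold Spec_get_node_children get_node_children get_node_children_alt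
  simp [List.foldl, PySem.Str.pyGet?]
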